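/- GENERATED by tools/from_farm_form.py from prooffarm-gif/accepted/DGifGetExtension.P/Proof.lean (a worked proof of the farm's unit `DGifGetExtension.P`,
   accepted by the verdict) — do not edit. -/
import Gif.Spec.Units.DGifGetExtension_P
import Gif.Spec.AllSegs

open X86 X86.User Asan ProgX.Base ProgX.Base.Spec Gif.Spec

set_option maxRecDepth 4000
set_option maxHeartbeats 4000000

/-!
  `DGifGetExtension.P` (0x109a80 … 0x109aca, 16 instructions; dgif_lib.c:570): THE PROLOGUE OF A PROTECTED FUNCTION, after the
  worked example `DGifGetWord.P`. The lemmas are those of Gif/Spec/FrameCarry.lean (§1 – §3). The blocks below: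
    1. the prelude and the walk to the cut behind the last inline shadow store;
    2. `name_stores2`: the memory before the shadow stores gets the name `M0`, `hmem : s.mem = storesMem M0 (base / 8) F.prologue`;
    3. about `M0` (a nest of STACK stores over `e.mem`): the footprint `hsame0`, the saved registers' slots;
    4. `after_prologue` (`HeapInv` with the own frame pushed, `GifOK`, `rem`), `prologue_same` (the footprint);
    5. the exit assertion `Start`, field by field.
  The frame: five pushes and `sub rsp, 64`: the body's `rsp` is `RA − 104`; the frame is 64 bytes (`raOff = 104`, `raOff − size = 40`).
-/

/-- The prologue of `DGifGetExtension` establishes `Start` at 0x109aca. -/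
theorem Gif.Spec.Proved.DGifGetExtension_P_ok : Gif.Spec.DGifGetExtension_P.Statement := by
  intro Lay hLay μ hμ u₀ hcode H rest frames F R e ret he hpre
  -- 1. THE PRELUDE: the entry's facts (`he_align`, `he_room`, `he_top`, `he_retAddr`, `he_df`, `he_mx` …), the precondition
  have he0 := he
  v_entry he
  obtain ⟨henv, hrdi, hcodep, hextp, hdisj⟩ := hpre
  -- `*ExtCode` and `*Extension` lie above the return-address slot (`Body.code_above`, `Body.ext_above`)
  have hca : (e.reg .rsp).toNat + 8 ≤ (e.reg .rsi).toNat := hcodep.above (by omega) henv.heap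
  have hea : (e.reg .rsp).toNat + 8 ≤ (e.reg .rdx).toNat := hextp.above (by omega) henv.heap
  -- THE WALK (0x109a80 … 0x109aca, l.570), to the cut behind the last inline shadow store
  u_walk hcode [hμ.vendor] until [Gif.L.DGifGetExtension.at_109aca] span [ProgX.Base.L.textLo, ProgX.Base.L.textHi] side (v_side)
  -- 2. NAMING THE MEMORY before the two shadow stores (0x109ab6, 0x109ac0): the index register's source (`rsp` at the
  -- `mov rbp, rsp`), then per store the displacement (decimal), its granule offset, its width, its value (decimal)
  have e104 : (e.reg .rsp - 104).toNat = (e.reg .rsp).toNat - 104 := by u_omega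
  obtain ⟨M0, hM0, hmem⟩ := name_stores2 (e.reg .rsp - 104) 12582912 12582916 0 4 4059165169 4 4 4092850945
    w_mem (by omega) (by decide) (by decide) (by decide) (by decide)
  have hpro : Gif.Frames.DGifGetExtension.prologue = [⟨0, 4, 4059165169⟩, ⟨4, 4, 4092850945⟩] := rfl
  rw [← hpro, e104] at hmem
  -- 3. ABOUT `M0`: only stack stores over `e.mem` (five pushes, the frame's three header words)
  have hsame0 : Mem.SameExcept [⟨(e.reg .rsp).toNat - 432, (e.reg .rsp).toNat⟩] e.mem M0 := by
    rw [hM0]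
    u_same
  have k_r14 : M0.readLE (e.reg .rsp - 8) 8 = (e.reg .r14).toNat := by
    rw [hM0]
    u_read
  have k_r13 : M0.readLE (e.reg .rsp - 16) 8 = (e.reg .r13).toNat := by
    rw [hM0]
    u_read
  have k_r12 : M0.readLE (e.reg .rsp - 24) 8 = (e.reg .r12).toNat := by
    rw [hM0]
    u_read
  have k_rbp : M0.readLE (e.reg .rsp - 32) 8 = (e.reg .rbp).toNat := by
    rw [hM0]
    u_read
  have k_rbx : M0.readLE (e.reg .rsp - 40) 8 = (e.reg .rbx).toNat := by
    rw [hM0]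
    u_read
  clear hM0 w_mem
  -- 4. THE ENVIRONMENT behind the prologue: the heap's invariant with the own frame pushed, the state invariant, the reader
  obtain ⟨hinv1, hok1, hrem1⟩ := after_prologue (top := (e.reg .rsp).toNat) (top' := (e.reg .rsp).toNat - 104) (ro := 104)
    (Fl := Gif.Frames.DGifGetExtension) henv.heap.inv henv.ctx henv.ok Gif.Frames.DGifGetExtension_ok rfl he_align hsame0
    (by omega) (Nat.le_refl _) (by omega) (by omega)
  -- the prologue's footprint in front of the contract's windows (`Body.same`), and alone (for the return-address slot)
  have hsame1 := prologue_same (top := (e.reg .rsp).toNat) (Fl := Gif.Frames.DGifGetExtension) Gif.Frames.DGifGetExtension_ok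
    (ro := 104) (ro' := 40) rfl rfl he_align (by omega) (by omega) hsame0 []
  have hsame2 := prologue_same (top := (e.reg .rsp).toNat) (Fl := Gif.Frames.DGifGetExtension) Gif.Frames.DGifGetExtension_ok
    (ro := 104) (ro' := 40) rfl rfl he_align (by omega) (by omega) hsame0
    [⟨F.pv + 88, F.pv + 344⟩,
     ⟨(e.reg .rsi).toNat, (e.reg .rsi).toNat + 4⟩,
     ⟨(e.reg .rdx).toNat, (e.reg .rdx).toNat + 8⟩,
     ⟨F.gif + 96, F.gif + 100⟩,
     ⟨R.cur, R.cur + 8⟩]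
  have hin : ∀ s, s ∈ Gif.Frames.DGifGetExtension.prologue → s.idx + s.width ≤ 8 := by decide
  rw [← hmem] at hinv1 hok1 hrem1 hsame1 hsame2
  -- 5. THE EXIT ASSERTION: `Body` at 0x109aca (`lea rdi, [rdi + 70H]`, l.572) …
  have hbody : DGifGetExtension.Body Gif.L.DGifGetExtension.at_109aca H rest frames F R u₀ e ret s_109ac0 := {
    entry := he0
    pre := ⟨henv, hrdi, hcodep, hextp, hdisj⟩
    code_above := hca
    ext_above := hea
    rip := w_rip
    rsp := w_rsp
    rbx := w_rbx
    r13 := w_r13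
    r14 := w_r14
    rbp := w_rbp
    r15 := w_kept.get .r15 rfl
    -- a slot is read THROUGH the shadow stores (`readLE_storesMem`), then in `M0`
    slot_r14 := by
      rw [hmem, readLE_storesMem M0 _ 8 _ hin (by omega) _ _ (by u_omega)]
      exact k_r14
    slot_r13 := by
      rw [hmem, readLE_storesMem M0 _ 8 _ hin (by omega) _ _ (by u_omega)]
      exact k_r13
    slot_r12 := by
      rw [hmem, readLE_storesMem M0 _ 8 _ hin (by omega) _ _ (by u_omega)]
      exact k_r12
    slot_rbp := by
      rw [hmem, readLE_storesMem M0 _ 8 _ hin (by omega) _ _ (by u_omega)]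
      exact k_rbp
    slot_rbx := by
      rw [hmem, readLE_storesMem M0 _ 8 _ hin (by omega) _ _ (by u_omega)]
      exact k_rbx
    -- the return address: the prologue's footprint ends below its slot
    slot_ra := by
      rw [prologue_same_readLE hsame1 (e.reg .rsp) 8 (Nat.le_refl _) (by omega)]
      exact he_retAddr
    inv := hinv1
    ok := hok1
    rem := Nat.le_of_eq hrem1
    same := hsame2
    code := ProgX.Base.conv_code_in w_eq
    -- DF and MXCSR by hand (`v_inv` is slow behind a walk with shadow stores)
    abi := by
      refine ProgX.Base.abiInv_of ?_ ?_
      · rw [w_flags]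
        simp only [X86.User.df_setStatus]
        exact he_df
      · rw [w_mxcsr]
        exact he_mx
  }
  -- … and what only the first body segment may use: `rdi` still holds gif, the reader did not move
  refine ReachVia.done ?_
  exact {
    body := hbody
    rdi := w_kept.get .rdi rfl
    rem_eq := hrem1
  }
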